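-- pv_equiv track=rewrite | github.com/nmcglohon/AoC-Collection | 2018/Day2/checksum-part1.py | is_containing_repeat_n
-- ===== SOURCE A (Python) =====
-- def is_containing_repeat_n(instr, n):
--     letter_freqs = {}
--     for let in instr:
--         if let in letter_freqs:
--             letter_freqs[let] += 1
--         else:
--             letter_freqs[let] = 1
--
--     freq_exactly_n = [x for x in letter_freqs.values() if x == n]
--
--     if len(freq_exactly_n) > 0:
--         return True
--     else:
--         return False
-- ===== SOURCE B (Python) =====
-- def is_containing_repeat_n(instr, n):
--     # Sort the letters so equal letters become contiguous, then scan run lengths: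
--     # some letter appears exactly n times iff some run has length exactly n.
--     s = sorted(instr)
--     run = 0
--     for i, c in enumerate(s):
--         run += 1
--         if i + 1 == len(s) or s[i + 1] != c:
--             if run == n:
--                 return True
--             run = 0
--     return False
-- ===== Notes on version B (the rewrite author's own statement) =====
-- stated objective: alternative
-- what changed: Replaces the frequency dictionary with sort-then-run-length-scan: sorting makes equal letters contiguous, and a single pass over the sorted list checks whether any maximal run has length exactly n; no counting structure is built at all.
import Mathlib
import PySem

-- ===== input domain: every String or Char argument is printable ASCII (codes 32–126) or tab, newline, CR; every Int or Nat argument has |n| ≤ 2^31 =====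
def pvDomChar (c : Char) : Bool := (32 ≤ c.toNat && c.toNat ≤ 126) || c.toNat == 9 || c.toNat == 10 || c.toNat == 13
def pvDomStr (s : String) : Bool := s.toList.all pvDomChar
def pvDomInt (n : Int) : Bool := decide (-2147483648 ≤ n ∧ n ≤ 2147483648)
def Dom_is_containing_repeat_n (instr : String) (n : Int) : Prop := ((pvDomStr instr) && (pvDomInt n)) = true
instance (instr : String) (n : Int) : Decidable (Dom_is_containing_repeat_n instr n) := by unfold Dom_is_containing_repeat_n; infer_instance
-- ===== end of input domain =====

-- B replaces A's frequency dictionary with sort-then-run-length-scan: sorting makes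
-- equal letters contiguous and one pass tests whether any run has length exactly n
-- (objective: alternative algorithm, no counting structure built).

-- ===== PORT A =====
def is_containing_repeat_n (instr : String) (n : Int) : Bool :=
  let letter_freqs : PySem.Dict Char Int :=
    instr.toList.foldl
      (fun d llet =>
        if d.contains llet then d.insert llet (d.getD llet 0 + 1)  -- letter_freqs[let] += 1
        else d.insert llet 1)                                       -- letter_freqs[let] = 1
      PySem.Dict.empty
  let freq_exactly_n := letter_freqs.values.filter (fun x => x == n)
  if freq_exactly_n.length > 0 then true else false

-- ===== PORT B =====
-- the for-loop of Source B over the sorted list: `run` copies of the current letter seen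
-- so far, lookahead s[i+1] becomes pattern matching on the next list element
def pvScan : List Char → Int → Int → Bool
  | [], _, _ => false
  | [_], run, n => (run + 1) == n                       -- i + 1 == len(s): end of the last run
  | c :: c2 :: rest, run, n =>
      if c2 == c then pvScan (c2 :: rest) (run + 1) n
      else if (run + 1) == n then true
      else pvScan (c2 :: rest) 0 n

def is_containing_repeat_n_alt (instr : String) (n : Int) : Bool :=
  pvScan (PySem.List.sorted instr.toList (fun x => x) false) 0 n

-- ===== PRECONDITION & SPEC =====
def Spec_is_containing_repeat_n (instr : String) (n : Int) (out : Bool) : Prop := out = is_containing_repeat_n_alt instr n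
instance (instr : String) (n : Int) (out : Bool) : Decidable (Spec_is_containing_repeat_n instr n out) := by unfold Spec_is_containing_repeat_n; infer_instance

-- ===== CLAIM (what is proved, stated in full; the proofs are below) =====
def Claim_equal_is_containing_repeat_n : Prop := ∀ (instr : String) (n : Int), Dom_is_containing_repeat_n instr n → Spec_is_containing_repeat_n instr n (is_containing_repeat_n instr n)

-- ===== LEMMAS AND PROOFS =====

-- A's two branches both perform insert llet (old count + 1): the loop builds Counter(instr).
lemma pv_fold_eq_counter (xs : List Char) :
    xs.foldl
      (fun d llet =>
        if d.contains llet then d.insert llet (d.getD llet 0 + 1)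
        else d.insert llet 1)
      PySem.Dict.empty = PySem.Dict.counter xs := by
  have hfun : (fun (d : PySem.Dict Char Int) llet =>
        if d.contains llet then d.insert llet (d.getD llet 0 + 1)
        else d.insert llet 1)
      = fun d llet => d.insert llet (d.getD llet 0 + 1) := by
    funext d x
    by_cases h : d.contains x = true
    · simp [h]
    · have h' : d.contains x = false := by simpa using h
      simp only [h', Bool.false_eq_true, if_false]
      rw [PySem.Dict.getD_of_not_contains (h := h')]
      norm_num
  rw [hfun, PySem.Dict.foldl_insert_getD_add_one_eq_counter]

-- A returns true iff some letter of instr occurs exactly n times.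
lemma pvA_iff (instr : String) (n : Int) :
    is_containing_repeat_n instr n = true ↔ ∃ c ∈ instr.toList, (instr.toList.count c : Int) = n := by
  unfold is_containing_repeat_n
  have hval : (PySem.Dict.counter instr.toList).values
      = (PySem.Set.ofList instr.toList).map (fun k => (instr.toList.count k : Int)) := by
    simp [PySem.Dict.values, PySem.Dict.items_counter, List.map_map, Function.comp]
  simp only [pv_fold_eq_counter, hval]
  constructor
  · intro hF
    by_cases hlen : 0 < (((PySem.Set.ofList instr.toList).map
        (fun k => (instr.toList.count k : Int))).filter (fun x => x == n)).length
    · rcases List.exists_mem_of_length_pos hlen with ⟨v, hv⟩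
      rcases List.mem_filter.1 hv with ⟨hmem, hvn⟩
      rcases List.mem_map.1 hmem with ⟨k, hk, rfl⟩
      exact ⟨k, by simpa [PySem.Set.mem_ofList] using hk, by simpa using hvn⟩
    · simp [hlen] at hF
  · rintro ⟨c, hc, hcn⟩
    have hmem : (instr.toList.count c : Int) ∈ (((PySem.Set.ofList instr.toList).map
        (fun k => (instr.toList.count k : Int))).filter (fun x => x == n)) :=
      List.mem_filter.2 ⟨List.mem_map_of_mem (by simpa [PySem.Set.mem_ofList] using hc),
        by simpa using hcn⟩
    have hlen := List.length_pos_of_mem hmem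
    simp [hlen]

-- loop invariant of B's scan on a sorted (Pairwise ≤) list with head c: `run`
-- previously-seen copies of c are pending, so it succeeds iff the run of c closes at
-- exactly n, or some later distinct letter has exactly n occurrences in the tail.
lemma pvScan_iff (rest : List Char) : ∀ (c : Char), (c :: rest).Pairwise (· ≤ ·) → ∀ (run n : Int),
    (pvScan (c :: rest) run n = true ↔
      (run + ((c :: rest).count c : Int) = n ∨ ∃ x ∈ rest, x ≠ c ∧ (rest.count x : Int) = n)) := by
  induction rest with
  | nil =>
      intro c _ run n
      simp [pvScan]
  | cons c2 rest' ih =>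
      intro c hpair run n
      rcases List.pairwise_cons.1 hpair with ⟨hle, htail⟩
      by_cases hc : c2 = c
      · subst hc
        rw [show pvScan (c2 :: c2 :: rest') run n = pvScan (c2 :: rest') (run + 1) n by
          simp [pvScan]]
        rw [ih c2 htail (run + 1) n]
        constructor
        · rintro (h | ⟨x, hx, hxc, hcnt⟩)
          · left
            simp at h ⊢
            omega
          · exact Or.inr ⟨x, List.mem_cons_of_mem _ hx, hxc,
              by simpa [List.count_cons, Ne.symm hxc] using hcnt⟩
        · rintro (h | ⟨x, hx, hxc, hcnt⟩)
          · left
            simp at h ⊢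
            omega
          · rcases List.mem_cons.1 hx with rfl | hx'
            · exact absurd rfl hxc
            · exact Or.inr ⟨x, hx', hxc, by simpa [List.count_cons, Ne.symm hxc] using hcnt⟩
      · have hltc2 : c < c2 := lt_of_le_of_ne (hle c2 List.mem_cons_self) (Ne.symm hc)
        have hlt : ∀ x ∈ c2 :: rest', c < x := by
          intro x hx
          rcases List.mem_cons.1 hx with rfl | hx'
          · exact hltc2
          · exact lt_of_lt_of_le hltc2 ((List.pairwise_cons.1 htail).1 x hx')
        have hnotmem : c ∉ c2 :: rest' := fun h => lt_irrefl c (hlt c h)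
        have hcount0 : (c2 :: rest').count c = 0 := List.count_eq_zero.2 hnotmem
        rw [show pvScan (c :: c2 :: rest') run n =
              (if ((run + 1 : Int) == n) = true then true else pvScan (c2 :: rest') 0 n) by
          simp [pvScan, hc]]
        have hcountc : (((c :: c2 :: rest').count c : Nat) : Int) = 1 := by
          simp [hcount0]
        by_cases hn : (run + 1 : Int) = n
        · simp only [hn, beq_self_eq_true, if_true, true_iff]
          left
          rw [hcountc]
          omega
        · have hn' : ((run + 1 : Int) == n) = false := by simpa using hn
          simp only [hn', Bool.false_eq_true, if_false]
          rw [ih c2 htail 0 n]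
          constructor
          · rintro (h | ⟨x, hx, hxc2, hcnt⟩)
            · refine Or.inr ⟨c2, List.mem_cons_self, Ne.symm (fun hh => hc hh.symm), ?_⟩
              omega
            · have hxc : x ≠ c := fun hh => by
                exact absurd (hlt x (List.mem_cons_of_mem _ hx)) (by rw [hh]; exact lt_irrefl c)
              exact Or.inr ⟨x, List.mem_cons_of_mem _ hx, hxc,
                by simpa [List.count_cons, Ne.symm hxc2] using hcnt⟩
          · rintro (h | ⟨x, hx, hxc, hcnt⟩)
            · rw [hcountc] at h
              omega
            · rcases List.mem_cons.1 hx with rfl | hx'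
              · left
                simpa using hcnt
              · by_cases hxc2 : x = c2
                · subst hxc2
                  left
                  simpa using hcnt
                · exact Or.inr ⟨x, hx', hxc2, by simpa [List.count_cons, Ne.symm hxc2] using hcnt⟩

-- B returns true iff some letter of instr occurs exactly n times.
lemma pvB_iff (instr : String) (n : Int) :
    is_containing_repeat_n_alt instr n = true ↔ ∃ c ∈ instr.toList, (instr.toList.count c : Int) = n := by
  unfold is_containing_repeat_n_alt
  have hperm : (PySem.List.sorted instr.toList (fun x => x) false).Perm instr.toList :=
    PySem.List.sorted_perm ..
  have hpair : (PySem.List.sorted instr.toList (fun x => x) false).Pairwise (· ≤ ·) := by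
    simpa using PySem.List.sorted_pairwise (xs := instr.toList) (key := fun x => x)
  rcases hs : PySem.List.sorted instr.toList (fun x => x) false with _ | ⟨c, rest⟩
  · rw [hs] at hperm
    have hnil : instr.toList = [] := hperm.symm.eq_nil
    simp [pvScan, hnil]
  · rw [hs] at hperm hpair
    rw [pvScan_iff rest c hpair 0 n]
    constructor
    · rintro (h | ⟨x, hx, hxc, hcnt⟩)
      · refine ⟨c, hperm.mem_iff.1 List.mem_cons_self, ?_⟩
        rw [← hperm.count_eq]
        omega
      · refine ⟨x, hperm.mem_iff.1 (List.mem_cons_of_mem _ hx), ?_⟩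
        rw [← hperm.count_eq]
        simpa [List.count_cons, Ne.symm hxc] using hcnt
    · rintro ⟨x, hx, hcnt⟩
      have hcnt' : (((c :: rest).count x : Nat) : Int) = n := by
        rw [hperm.count_eq]
        exact hcnt
      by_cases hxc : x = c
      · subst hxc
        left
        omega
      · have hxr : x ∈ rest := by
          rcases List.mem_cons.1 (hperm.mem_iff.2 hx) with rfl | hx'
          · exact absurd rfl hxc
          · exact hx'
        exact Or.inr ⟨x, hxr, hxc, by simpa [List.count_cons, Ne.symm hxc] using hcnt'⟩

-- ===== VERDICT (by name: the statement is the Claim_ definition above) =====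
theorem is_containing_repeat_n_spec : Claim_equal_is_containing_repeat_n := by
  intro instr n _
  unfold Spec_is_containing_repeat_n
  rw [Bool.eq_iff_iff, pvA_iff, pvB_iff]
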